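-- pv_equiv track=rewrite | github.com/SGupta101/AI | Sudoku Test One.py | get_symbol_set
-- ===== SOURCE A (Python) =====
-- def get_symbol_set(size):
--     sorted_values = set()
--     abc = ["A", "B", "C", "D", "E", "F", "G", "H", "I", "J", "K", "L", "M", "N", "O"]
--     if size > 9:
--         for k in range(1, 10):
--             sorted_values.add(str(k))
--         for k in range(0, size - 9):
--             sorted_values.add(abc[k])
--     else:
--         for k in range(1, size + 1):
--             sorted_values.add(str(k))
--     return sorted_values
-- ===== SOURCE B (Python) =====
-- def get_symbol_set(size):
--     if size <= 0:
--         return set()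
--     n = size - 1
--     sym = str(n + 1) if n < 9 else chr(ord('A') + n - 9)
--     return get_symbol_set(n) | {sym}
-- ===== Notes on version B (the rewrite author's own statement) =====
-- stated objective: alternative
-- what changed: Replaces A's branch with two table-driven loops by a recursion on size that builds the set back-to-front and computes each symbol by character arithmetic (str(n+1) or chr(ord('A')+n-9)) with no symbol table.
import Mathlib
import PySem

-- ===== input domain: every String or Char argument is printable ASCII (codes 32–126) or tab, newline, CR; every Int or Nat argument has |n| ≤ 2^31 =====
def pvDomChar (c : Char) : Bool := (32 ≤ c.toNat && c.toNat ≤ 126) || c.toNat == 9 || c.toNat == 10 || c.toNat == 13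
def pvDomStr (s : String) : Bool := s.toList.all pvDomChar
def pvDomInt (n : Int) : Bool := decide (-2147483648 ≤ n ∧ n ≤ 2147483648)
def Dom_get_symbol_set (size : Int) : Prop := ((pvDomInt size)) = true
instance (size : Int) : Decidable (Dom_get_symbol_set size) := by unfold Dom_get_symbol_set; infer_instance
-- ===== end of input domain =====

-- B replaces A's branch with two table-driven loops by a recursion on size that
-- computes each symbol by character arithmetic (no symbol table); objective: alternative.

-- ===== PORT A =====
def get_symbol_set (size : Int) : List String :=
  let abc : List String := ["A","B","C","D","E","F","G","H","I","J","K","L","M","N","O"]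
  if size > 9 then
    let s1 : PySem.Set String :=
      (PySem.List.pyRange 1 10 1).foldl
        (fun sv k => PySem.Set.add sv (PySem.Int.toStr k)) (PySem.Set.ofList [])
    (PySem.List.pyRange 0 (size - 9) 1).foldl
      (fun sv k => PySem.Set.add sv ((PySem.List.pyGet? abc k).getD "")) s1
  else
    (PySem.List.pyRange 1 (size + 1) 1).foldl
      (fun sv k => PySem.Set.add sv (PySem.Int.toStr k)) (PySem.Set.ofList [])

-- ===== PORT B =====
def get_symbol_set_alt (size : Int) : List String :=
  if size ≤ 0 then []
  else
    let n := size - 1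
    let sym : String :=
      if n < 9 then PySem.Int.toStr (n + 1)
      else String.ofList [Char.ofNat (65 + (n - 9)).toNat]   -- chr(ord('A') + n - 9)
    PySem.Set.add (get_symbol_set_alt n) sym
termination_by size.toNat
decreasing_by simp; omega

-- ===== PRECONDITION & SPEC =====
-- Pre_ excludes size > 24, on which the Python A raises IndexError (abc[k] out of range).
def Pre_get_symbol_set (size : Int) : Prop := size ≤ 24
instance (size : Int) : Decidable (Pre_get_symbol_set size) := by unfold Pre_get_symbol_set; infer_instance
def pvWitness_get_symbol_set : Int := (9)
def Spec_get_symbol_set (size : Int) (out : List String) : Prop := out = get_symbol_set_alt size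
instance (size : Int) (out : List String) : Decidable (Spec_get_symbol_set size out) := by unfold Spec_get_symbol_set; infer_instance

-- ===== CLAIM (what is proved, stated in full; the proofs are below) =====
def Claim_equal_get_symbol_set : Prop := ∀ (size : Int), Dom_get_symbol_set size → Pre_get_symbol_set size → Spec_get_symbol_set size (get_symbol_set size)

-- ===== LEMMAS AND PROOFS =====
-- proof-only structural twin of the WF-recursive port B, so `decide` can evaluate it
def pvAltNat : Nat → List String
  | 0 => []
  | n + 1 =>
    PySem.Set.add (pvAltNat n)
      (if ((n : Int)) < 9 then PySem.Int.toStr ((n : Int) + 1)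
       else String.ofList [Char.ofNat (65 + ((n : Int) - 9)).toNat])

theorem pvAlt_eq (size : Int) (h : 0 ≤ size) : get_symbol_set_alt size = pvAltNat size.toNat := by
  obtain ⟨n, rfl⟩ := Int.eq_ofNat_of_zero_le h
  induction n with
  | zero => rw [get_symbol_set_alt]; simp [pvAltNat]
  | succ k ih =>
    rw [get_symbol_set_alt]
    rw [if_neg (by omega : ¬ ((k + 1 : Nat) : Int) ≤ 0)]
    have hc : ((k + 1 : Nat) : Int) - 1 = (k : Int) := by push_cast; ring
    simp only [hc, ih (by omega)]
    have ht : ((k + 1 : Nat) : Int).toNat = k + 1 := by omega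
    rw [ht]
    simp [pvAltNat]

theorem pyRange_one_nil {a b : Int} (h : b ≤ a) : PySem.List.pyRange a b 1 = [] := by
  rw [PySem.List.pyRange_one]
  have : (b - a).toNat = 0 := by omega
  simp [this]

-- ===== VERDICT (by name: the statement is the Claim_ definition above) =====
theorem get_symbol_set_spec : Claim_equal_get_symbol_set := by
  intro size _ hpre
  unfold Spec_get_symbol_set
  by_cases hle : size ≤ 0
  · have h1 : size + 1 ≤ 1 := by omega
    rw [get_symbol_set_alt]
    simp [get_symbol_set, pyRange_one_nil h1,
      if_neg (by omega : ¬ size > 9), if_pos hle]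
  · unfold Pre_get_symbol_set at hpre
    rw [pvAlt_eq size (by omega)]
    interval_cases size <;> decide
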